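-- pv_equiv track=rewrite | github.com/Hima9791/New_ACC | pipelines/fixed_pipeline.py | extract_block_texts
-- ===== SOURCE A (Python) =====
-- def extract_block_texts(main_key: str, category: str):
--     main_key = main_key.strip()
--     if category in ["Single Value with Single Condition", "Number with Single Condition"]:
--         if "@" in main_key:
--             return [x.strip() for x in main_key.split("@", 1)]
--         else:
--             return [main_key]
--     elif category == "Single Value with Range Condition":
--         if "@" in main_key:
--             left, right = [x.strip() for x in main_key.split("@", 1)]
--             right_parts = [x.strip() for x in right.split("to", 1)]
--             return [left] + right_parts
--         else:
--             return [main_key]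
--     elif category == "Range Value Single Condition":
--         if "@" in main_key:
--             left, right = [x.strip() for x in main_key.split("@", 1)]
--             left_parts = [x.strip() for x in left.split("to", 1)]
--             return left_parts + [right]
--         else:
--             return [main_key]
--     elif category == "Range Value with Range Condition":
--         if "@" in main_key:
--             left, right = [x.strip() for x in main_key.split("@", 1)]
--             left_parts = [x.strip() for x in left.split("to", 1)]
--             right_parts = [x.strip() for x in right.split("to", 1)]
--             return left_parts + right_parts
--         else:
--             return [main_key]
--     elif category == "Range Values":
--         return [x.strip() for x in main_key.split("to")]
--     elif category == "Single Value Multi Condition":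
--         if "@" in main_key:
--             value_part, conds_part = [x.strip() for x in main_key.split("@", 1)]
--             conds = [x.strip() for x in conds_part.split(",")]
--             return [value_part] + conds
--         else:
--             return [main_key]
--     elif category == "Multi Value with Single Condition":
--         if "@" in main_key:
--             values_part, cond_part = [x.strip() for x in main_key.split("@", 1)]
--             values = [x.strip() for x in values_part.split(",")]
--             return values + [cond_part]
--         else:
--             return [main_key]
--     elif category == "Range Value with Multi Condition":
--         if "@" in main_key:
--             range_part, conds_part = [x.strip() for x in main_key.split("@", 1)]
--             range_parts = [x.strip() for x in range_part.split("to", 1)]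
--             conds = [x.strip() for x in conds_part.split(",")]
--             return range_parts + conds
--         else:
--             return [main_key]
--     elif category == "Multi Values":
--         return [x.strip() for x in main_key.split(",")]
--     else:
--         return [main_key]
-- ===== SOURCE B (Python) =====
-- # One-pass finite-state scanner: instead of composing library split() calls per
-- # branch, walk the stripped string once, emitting stripped tokens at active
-- # separators ('@' switches the scanner from the left spec to the right spec).
--
-- def _scan(s, sep, budget, trans, sep2, budget2):
--     """Left-to-right scan of s; split on `sep` while `budget` != 0; the first
--     `trans` char (if any) ends phase one and activates (sep2, budget2)."""
--     out, cur, i, n = [], [], 0, len(s)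
--     while i < n:
--         if trans is not None and s[i] == trans:
--             out.append("".join(cur).strip())
--             cur = []
--             sep, budget, trans = sep2, budget2, None
--             i += 1
--         elif budget != 0 and sep is not None and s.startswith(sep, i):
--             out.append("".join(cur).strip())
--             cur = []
--             budget -= 1
--             i += len(sep)
--         else:
--             cur.append(s[i])
--             i += 1
--     out.append("".join(cur).strip())
--     return out
--
--
-- def extract_block_texts(main_key: str, category: str):
--     mk = main_key.strip()
--     if category == "Range Values":
--         return _scan(mk, "to", -1, None, None, 0)
--     if category == "Multi Values":
--         return _scan(mk, ",", -1, None, None, 0)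
--     spec = {
--         "Single Value with Single Condition": (None, 0, None, 0),
--         "Number with Single Condition": (None, 0, None, 0),
--         "Single Value with Range Condition": (None, 0, "to", 1),
--         "Range Value Single Condition": ("to", 1, None, 0),
--         "Range Value with Range Condition": ("to", 1, "to", 1),
--         "Single Value Multi Condition": (None, 0, ",", -1),
--         "Multi Value with Single Condition": (",", -1, None, 0),
--         "Range Value with Multi Condition": ("to", 1, ",", -1),
--     }.get(category)
--     if spec is None or "@" not in mk:
--         return [mk]
--     s1, b1, s2, b2 = spec
--     return _scan(mk, s1, b1, "@", s2, b2)
-- ===== Notes on version B (the rewrite author's own statement) =====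
-- stated objective: alternative
-- what changed: Replaced the if/elif chain of composed str.split calls by a single left-to-right finite-state scanner that walks the stripped string once, emitting stripped tokens at active separators, with the first '@' switching the scanner from the left-half spec to the right-half spec.
import Mathlib
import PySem

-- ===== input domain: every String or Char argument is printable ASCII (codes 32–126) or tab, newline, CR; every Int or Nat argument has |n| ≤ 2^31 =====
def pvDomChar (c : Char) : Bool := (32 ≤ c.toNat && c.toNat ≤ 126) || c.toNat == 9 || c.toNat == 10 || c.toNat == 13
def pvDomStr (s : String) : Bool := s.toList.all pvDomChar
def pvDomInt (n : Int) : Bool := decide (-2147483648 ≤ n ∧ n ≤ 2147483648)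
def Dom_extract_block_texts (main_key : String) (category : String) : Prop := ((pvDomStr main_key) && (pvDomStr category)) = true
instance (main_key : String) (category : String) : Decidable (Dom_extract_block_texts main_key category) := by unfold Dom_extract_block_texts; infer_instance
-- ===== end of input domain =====

-- B replaces A's chain of composed str.split calls by a one-pass finite-state scanner
-- over the stripped string (objective: alternative, same values).

-- ===== PORT A =====
-- Fallback arms marked "unreachable" port Python lines that cannot execute
-- (split with a nonempty separator never fails; split("@", 1) with "@" present
-- yields exactly two parts, so the tuple unpack never raises).
def extract_block_texts (main_key : String) (category : String) : List String :=
  let mk := PySem.Str.strip main_key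
  if category = "Single Value with Single Condition" ∨ category = "Number with Single Condition" then
    if PySem.Str.isIn "@" mk then
      match PySem.Str.splitMax? mk "@" 1 with
      | some parts => parts.map PySem.Str.strip
      | none => []  -- unreachable: "@" ≠ ""
    else [mk]
  else if category = "Single Value with Range Condition" then
    if PySem.Str.isIn "@" mk then
      match PySem.Str.splitMax? mk "@" 1 with
      | some parts =>
        match parts.map PySem.Str.strip with
        | [left, right] =>
          [left] ++ (match PySem.Str.splitMax? right "to" 1 with
                     | some ps => ps.map PySem.Str.strip
                     | none => [])  -- unreachable
        | _ => []  -- unreachable: the unpack cannot raise here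
      | none => []  -- unreachable
    else [mk]
  else if category = "Range Value Single Condition" then
    if PySem.Str.isIn "@" mk then
      match PySem.Str.splitMax? mk "@" 1 with
      | some parts =>
        match parts.map PySem.Str.strip with
        | [left, right] =>
          (match PySem.Str.splitMax? left "to" 1 with
           | some ps => ps.map PySem.Str.strip
           | none => []) ++ [right]  -- unreachable none-arm
        | _ => []  -- unreachable
      | none => []  -- unreachable
    else [mk]
  else if category = "Range Value with Range Condition" then
    if PySem.Str.isIn "@" mk then
      match PySem.Str.splitMax? mk "@" 1 with
      | some parts =>
        match parts.map PySem.Str.strip with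
        | [left, right] =>
          (match PySem.Str.splitMax? left "to" 1 with
           | some ps => ps.map PySem.Str.strip
           | none => []) ++
          (match PySem.Str.splitMax? right "to" 1 with
           | some ps => ps.map PySem.Str.strip
           | none => [])  -- unreachable none-arms
        | _ => []  -- unreachable
      | none => []  -- unreachable
    else [mk]
  else if category = "Range Values" then
    match PySem.Str.split? mk "to" with
    | some ps => ps.map PySem.Str.strip
    | none => []  -- unreachable: "to" ≠ ""
  else if category = "Single Value Multi Condition" then
    if PySem.Str.isIn "@" mk then
      match PySem.Str.splitMax? mk "@" 1 with
      | some parts =>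
        match parts.map PySem.Str.strip with
        | [value_part, conds_part] =>
          [value_part] ++ (match PySem.Str.split? conds_part "," with
                           | some ps => ps.map PySem.Str.strip
                           | none => [])  -- unreachable
        | _ => []  -- unreachable
      | none => []  -- unreachable
    else [mk]
  else if category = "Multi Value with Single Condition" then
    if PySem.Str.isIn "@" mk then
      match PySem.Str.splitMax? mk "@" 1 with
      | some parts =>
        match parts.map PySem.Str.strip with
        | [values_part, cond_part] =>
          (match PySem.Str.split? values_part "," with
           | some ps => ps.map PySem.Str.strip
           | none => []) ++ [cond_part]  -- unreachable none-arm
        | _ => []  -- unreachable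
      | none => []  -- unreachable
    else [mk]
  else if category = "Range Value with Multi Condition" then
    if PySem.Str.isIn "@" mk then
      match PySem.Str.splitMax? mk "@" 1 with
      | some parts =>
        match parts.map PySem.Str.strip with
        | [range_part, conds_part] =>
          (match PySem.Str.splitMax? range_part "to" 1 with
           | some ps => ps.map PySem.Str.strip
           | none => []) ++
          (match PySem.Str.split? conds_part "," with
           | some ps => ps.map PySem.Str.strip
           | none => [])  -- unreachable none-arms
        | _ => []  -- unreachable
      | none => []  -- unreachable
    else [mk]
  else if category = "Multi Values" then
    match PySem.Str.split? mk "," with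
    | some ps => ps.map PySem.Str.strip
    | none => []  -- unreachable: "," ≠ ""
  else [mk]

-- ===== PORT B =====
-- _scan, as structural recursion on the remaining characters; fuel = length + 1
-- makes the Python while-loop terminate exactly where it does in Python (every
-- separator B passes is nonempty, so each iteration consumes at least one char).
-- `cur` is kept reversed (Python appends; we cons), tokens are List Char and are
-- joined to Strings by the caller's final map, mirroring "".join(cur).strip().
def pvScanGo : Nat → Option (List Char) → Int → Option Char → Option (List Char) → Int →
    List Char → List Char → List (List Char) → List (List Char)
  | 0, _, _, _, _, _, l, cur, acc => (PySem.Chars.strip (cur.reverse ++ l) :: acc).reverse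
  | _ + 1, _, _, _, _, _, [], cur, acc => (PySem.Chars.strip cur.reverse :: acc).reverse
  | fuel + 1, sep, budget, tr, sep2, budget2, c :: rest, cur, acc =>
    if tr = some c then
      pvScanGo fuel sep2 budget2 none sep2 budget2 rest [] (PySem.Chars.strip cur.reverse :: acc)
    else if budget ≠ 0 ∧ sep.isSome ∧ (sep.getD []).isPrefixOf (c :: rest) then
      pvScanGo fuel sep (budget - 1) tr sep2 budget2 ((c :: rest).drop (sep.getD []).length) []
        (PySem.Chars.strip cur.reverse :: acc)
    else
      pvScanGo fuel sep budget tr sep2 budget2 rest (c :: cur) acc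

def pvScan (s : List Char) (sep : Option (List Char)) (budget : Int) (tr : Option Char)
    (sep2 : Option (List Char)) (budget2 : Int) : List (List Char) :=
  pvScanGo (s.length + 1) sep budget tr sep2 budget2 s [] []

def pvSpecs : PySem.Dict String (Option (List Char) × Int × Option (List Char) × Int) :=
  PySem.Dict.mk
    [ ("Single Value with Single Condition", (none, 0, none, 0)),
      ("Number with Single Condition", (none, 0, none, 0)),
      ("Single Value with Range Condition", (none, 0, some ['t','o'], 1)),
      ("Range Value Single Condition", (some ['t','o'], 1, none, 0)),
      ("Range Value with Range Condition", (some ['t','o'], 1, some ['t','o'], 1)),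
      ("Single Value Multi Condition", (none, 0, some [','], -1)),
      ("Multi Value with Single Condition", (some [','], -1, none, 0)),
      ("Range Value with Multi Condition", (some ['t','o'], 1, some [','], -1)) ]

def extract_block_texts_alt (main_key : String) (category : String) : List String :=
  let mk := PySem.Str.strip main_key
  if category = "Range Values" then
    (pvScan mk.toList (some ['t','o']) (-1) none none 0).map String.ofList
  else if category = "Multi Values" then
    (pvScan mk.toList (some [',']) (-1) none none 0).map String.ofList
  else
    match pvSpecs.get? category with
    | none => [mk]
    | some (s1, b1, s2, b2) =>
      if PySem.Str.isIn "@" mk then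
        (pvScan mk.toList s1 b1 (some '@') s2 b2).map String.ofList
      else [mk]

-- ===== PRECONDITION & SPEC =====
def Spec_extract_block_texts (main_key : String) (category : String) (out : List String) : Prop := out = extract_block_texts_alt main_key category
instance (main_key : String) (category : String) (out : List String) : Decidable (Spec_extract_block_texts main_key category out) := by unfold Spec_extract_block_texts; infer_instance

-- ===== CLAIM (what is proved, stated in full; the proofs are below) =====
def Claim_equal_extract_block_texts : Prop := ∀ (main_key : String) (category : String), Dom_extract_block_texts main_key category → Spec_extract_block_texts main_key category (extract_block_texts main_key category)

-- ===== LEMMAS AND PROOFS =====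

-- side conditions on a separator option: nonempty; nonempty and whitespace-free
def pvSepOk (sep : Option (List Char)) : Prop := ∀ sp, sep = some sp → sp ≠ []
def pvSepNoWS (sep : Option (List Char)) : Prop :=
  ∀ sp, sep = some sp → sp ≠ [] ∧ ∀ c ∈ sp, PySem.Chars.isspace c = false


theorem pvLstripWS (w u : List Char) (hw : ∀ c ∈ w, PySem.Chars.isspace c = true) :
    PySem.Chars.lstrip (w ++ u) = PySem.Chars.lstrip u := by
  have : List.dropWhile PySem.Chars.isspace w = [] := List.dropWhile_eq_nil_iff.mpr hw
  simp [PySem.Chars.lstrip, List.dropWhile_append, this]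

theorem pvRstripWS (w u : List Char) (hw : ∀ c ∈ w, PySem.Chars.isspace c = true) :
    PySem.Chars.rstrip (u ++ w) = PySem.Chars.rstrip u := by
  have : List.dropWhile PySem.Chars.isspace w.reverse = [] := by
    exact List.dropWhile_eq_nil_iff.mpr (by intro c hc; exact hw c (List.mem_reverse.mp hc))
  simp [PySem.Chars.rstrip, List.dropWhile_append, this]

theorem pvStripWSLeft (w u : List Char) (hw : ∀ c ∈ w, PySem.Chars.isspace c = true) :
    PySem.Chars.strip (w ++ u) = PySem.Chars.strip u := by
  simp [PySem.Chars.strip, pvLstripWS w u hw]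

theorem pvStripWSRight (w u : List Char) (hw : ∀ c ∈ w, PySem.Chars.isspace c = true) :
    PySem.Chars.strip (u ++ w) = PySem.Chars.strip u := by
  unfold PySem.Chars.strip PySem.Chars.lstrip
  rw [List.dropWhile_append]
  split
  · next h =>
    have hu : List.dropWhile PySem.Chars.isspace u = [] := by
      simpa using h
    have : List.dropWhile PySem.Chars.isspace w = [] := List.dropWhile_eq_nil_iff.mpr hw
    simp [hu, this, PySem.Chars.rstrip]
  · exact pvRstripWS w _ hw

theorem pvPrefixAppend (sp : List Char) (d : Char) (hd : d ∉ sp) :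
    ∀ (t r : List Char), sp.isPrefixOf (t ++ d :: r) = sp.isPrefixOf t := by
  induction sp with
  | nil => intro t r; simp
  | cons c sp' ih =>
    intro t r
    cases t with
    | nil =>
      simp only [List.nil_append, List.isPrefixOf]
      have : ¬ (c = d) := by simp [List.mem_cons] at hd; exact fun h => hd.1 h.symm
      simp [beq_iff_eq, this]
    | cons e t' =>
      simp only [List.cons_append, List.isPrefixOf]
      rw [ih (fun h => hd (List.mem_cons_of_mem _ h)) t' r]

theorem pvAccOut (fuel : Nat) : ∀ (sep : Option (List Char)) (b : Int) (tr : Option Char)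
    (sep2 : Option (List Char)) (b2 : Int) (l cur : List Char) (acc : List (List Char)),
    pvScanGo fuel sep b tr sep2 b2 l cur acc =
      acc.reverse ++ pvScanGo fuel sep b tr sep2 b2 l cur [] := by
  induction fuel with
  | zero => intro sep b tr sep2 b2 l cur acc; simp [pvScanGo]
  | succ f ih =>
    intro sep b tr sep2 b2 l cur acc
    cases l with
    | nil => simp [pvScanGo]
    | cons c rest =>
      simp only [pvScanGo]
      split
      · rw [ih _ _ _ _ _ _ _ (_ :: acc), ih _ _ _ _ _ _ _ [_]]
        simp
      · split
        · rw [ih _ _ _ _ _ _ _ (_ :: acc), ih _ _ _ _ _ _ _ [_]]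
          simp
        · rw [ih _ _ _ _ _ _ _ acc]

theorem pvFuelIrrel (f1 : Nat) : ∀ (f2 : Nat) (sep : Option (List Char)) (b : Int) (tr : Option Char)
    (sep2 : Option (List Char)) (b2 : Int) (l cur : List Char) (acc : List (List Char)),
    pvSepOk sep → pvSepOk sep2 → l.length < f1 → l.length < f2 →
    pvScanGo f1 sep b tr sep2 b2 l cur acc = pvScanGo f2 sep b tr sep2 b2 l cur acc := by
  induction f1 with
  | zero => intro f2 sep b tr sep2 b2 l cur acc _ _ h1 _; omega
  | succ f ih =>
    intro f2 sep b tr sep2 b2 l cur acc hs hs2 h1 h2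
    cases l with
    | nil =>
      cases f2 with
      | zero => omega
      | succ f2' => simp [pvScanGo]
    | cons c rest =>
      cases f2 with
      | zero => omega
      | succ f2' =>
        simp only [pvScanGo]
        split
        · exact ih f2' _ _ _ _ _ _ _ _ hs2 hs2 (by simp at h1 ⊢; omega) (by simp at h2 ⊢; omega)
        · split
          · next hcond =>
            obtain ⟨hb, hsome, hpre⟩ := hcond
            have hne : (sep.getD []) ≠ [] := by
              cases sep with
              | none => simp at hsome
              | some sp => exact hs sp rfl
            have hlen : 1 ≤ (sep.getD []).length := by
              cases hg : (sep.getD []) with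
              | nil => exact absurd hg hne
              | cons a as => simp
            apply ih f2' _ _ _ _ _ _ _ _ hs hs2
            · have := List.length_drop (l := (c :: rest)) (i := (sep.getD []).length)
              simp at h1 ⊢
              omega
            · simp at h2 ⊢
              omega
          · exact ih f2' _ _ _ _ _ _ _ _ hs hs2 (by simp at h1 ⊢; omega) (by simp at h2 ⊢; omega)

theorem pvStop (fuel : Nat) : ∀ (sep : Option (List Char)) (b : Int)
    (sep2 : Option (List Char)) (b2 : Int) (l cur : List Char) (acc : List (List Char)),
    (sep = none ∨ b = 0) → l.length < fuel →
    pvScanGo fuel sep b none sep2 b2 l cur acc = (PySem.Chars.strip (cur.reverse ++ l) :: acc).reverse := by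
  induction fuel with
  | zero => intro _ _ _ _ l _ _ _ h; omega
  | succ f ih =>
    intro sep b sep2 b2 l cur acc hs hl
    cases l with
    | nil => simp [pvScanGo]
    | cons c rest =>
      simp only [pvScanGo]
      have hcond : ¬ (b ≠ 0 ∧ sep.isSome ∧ (sep.getD []).isPrefixOf (c :: rest)) := by
        rcases hs with h | h
        · simp [h]
        · simp [h]
      simp only [reduceCtorEq, if_false, hcond]
      rw [ih _ _ _ _ _ _ _ hs (by simp at hl ⊢; omega)]
      simp

theorem pvNoMatch (fuel : Nat) : ∀ (sep : Option (List Char)) (b : Int)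
    (sep2 : Option (List Char)) (b2 : Int) (w cur : List Char) (acc : List (List Char)),
    pvSepNoWS sep → (∀ c ∈ w, PySem.Chars.isspace c = true) → w.length < fuel →
    pvScanGo fuel sep b none sep2 b2 w cur acc = (PySem.Chars.strip (cur.reverse ++ w) :: acc).reverse := by
  induction fuel with
  | zero => intro _ _ _ _ w _ _ _ _ h; omega
  | succ f ih =>
    intro sep b sep2 b2 w cur acc hs hw hl
    cases w with
    | nil => simp [pvScanGo]
    | cons c rest =>
      simp only [pvScanGo]
      have hcond : ¬ (b ≠ 0 ∧ sep.isSome ∧ (sep.getD []).isPrefixOf (c :: rest)) := by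
        rintro ⟨-, hsome, hpre⟩
        cases sep with
        | none => simp at hsome
        | some sp =>
          obtain ⟨hne, hnw⟩ := hs sp rfl
          cases sp with
          | nil => exact hne rfl
          | cons a as =>
            simp only [Option.getD_some, List.isPrefixOf] at hpre
            have : a = c := by
              by_contra hne'
              simp [beq_iff_eq, hne'] at hpre
            have h1 := hnw a (by simp)
            have h2 := hw c (by simp)
            rw [this] at h1
            rw [h1] at h2
            exact absurd h2 (by simp)
      simp only [reduceCtorEq, if_false, if_neg hcond]
      rw [ih _ _ _ _ _ _ _ hs (fun x hx => hw x (by simp [hx])) (by simp at hl ⊢; omega)]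
      simp

theorem pvConsumeWS (fuel : Nat) : ∀ (sep : Option (List Char)) (b : Int)
    (sep2 : Option (List Char)) (b2 : Int) (w l cur : List Char) (acc : List (List Char)),
    pvSepNoWS sep → pvSepOk sep2 → (∀ c ∈ w, PySem.Chars.isspace c = true) →
    w.length + l.length < fuel →
    pvScanGo fuel sep b none sep2 b2 (w ++ l) cur acc =
      pvScanGo fuel sep b none sep2 b2 l (w.reverse ++ cur) acc := by
  induction fuel with
  | zero => intro _ _ _ _ w l _ _ _ _ _ h; omega
  | succ f ih =>
    intro sep b sep2 b2 w l cur acc hs hs2 hw hlen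
    cases w with
    | nil => simp
    | cons c rest =>
      simp only [List.cons_append, pvScanGo]
      have hcond : ¬ (b ≠ 0 ∧ sep.isSome ∧ (sep.getD []).isPrefixOf (c :: (rest ++ l))) := by
        rintro ⟨-, hsome, hpre⟩
        cases sep with
        | none => simp at hsome
        | some sp =>
          obtain ⟨hne, hnw⟩ := hs sp rfl
          cases sp with
          | nil => exact hne rfl
          | cons a as =>
            simp only [Option.getD_some, List.isPrefixOf] at hpre
            have ha : a = c := by
              by_contra hne'
              simp [beq_iff_eq, hne'] at hpre
            have h1 := hnw a (by simp)
            have h2 := hw c (by simp)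
            rw [ha] at h1
            rw [h1] at h2
            exact absurd h2 (by simp)
      simp only [reduceCtorEq, if_false, hcond]
      rw [ih _ _ _ _ rest l (c :: cur) acc hs hs2 (fun x hx => hw x (by simp [hx]))
        (by simp at hlen ⊢; omega)]
      have hsep : pvSepOk sep := by
        intro sp h
        exact (hs sp h).1
      rw [pvFuelIrrel f (f+1) _ _ _ _ _ _ _ _ hsep hs2 (by simp at hlen ⊢; omega) (by simp at hlen ⊢; omega)]
      congr 1
      simp

theorem pvStripCommute (fuel : Nat) : ∀ (sep : Option (List Char)) (b : Int)
    (sep2 : Option (List Char)) (b2 : Int) (w1 w2 l cur : List Char) (acc : List (List Char)),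
    pvSepNoWS sep → pvSepOk sep2 →
    (∀ c ∈ w1, PySem.Chars.isspace c = true) → (∀ c ∈ w2, PySem.Chars.isspace c = true) →
    l.length + w2.length < fuel →
    pvScanGo fuel sep b none sep2 b2 (l ++ w2) (cur ++ w1.reverse) acc =
      pvScanGo fuel sep b none sep2 b2 l cur acc := by
  induction fuel with
  | zero => intro _ _ _ _ _ w2 l _ _ _ _ _ _ h; omega
  | succ f ih =>
    intro sep b sep2 b2 w1 w2 l cur acc hs hs2 hw1 hw2 hlen
    cases l with
    | nil =>
      rw [List.nil_append, pvNoMatch (f+1) _ _ _ _ _ _ _ hs hw2 (by simpa using hlen)]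
      have : (cur ++ w1.reverse).reverse ++ w2 = w1 ++ (cur.reverse ++ w2) := by
        simp
      rw [this, pvStripWSLeft w1 _ hw1, pvStripWSRight w2 _ hw2]
      simp [pvScanGo]
    | cons c rest =>
      have hprefEq : ∀ sp : List Char, (sp ≠ [] ∧ ∀ x ∈ sp, PySem.Chars.isspace x = false) →
          sp.isPrefixOf ((c :: rest) ++ w2) = sp.isPrefixOf (c :: rest) := by
        intro sp hsp
        cases w2 with
        | nil => simp
        | cons d w2' =>
          have hd : d ∉ sp := by
            intro hmem
            have := hsp.2 d hmem
            have := hw2 d (by simp)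
            simp_all
          exact pvPrefixAppend sp d hd (c :: rest) w2'
      simp only [List.cons_append, pvScanGo]
      have hcondEq : (b ≠ 0 ∧ sep.isSome ∧ (sep.getD []).isPrefixOf (c :: (rest ++ w2)))
          ↔ (b ≠ 0 ∧ sep.isSome ∧ (sep.getD []).isPrefixOf (c :: rest)) := by
        cases sep with
        | none => simp
        | some sp =>
          have := hprefEq sp (hs sp rfl)
          simp only [Option.getD_some, ← List.cons_append, this]
      by_cases hcond : b ≠ 0 ∧ sep.isSome ∧ (sep.getD []).isPrefixOf (c :: rest)
      · have hcond' := hcondEq.mpr hcond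
        simp only [reduceCtorEq, if_false, if_pos hcond, if_pos hcond']
        obtain ⟨-, hsome, hpre⟩ := hcond
        have hk : (sep.getD []).length ≤ (c :: rest).length :=
          (List.isPrefixOf_iff_prefix.mp hpre).length_le
        have hk1 : 1 ≤ (sep.getD []).length := by
          cases hsep : sep with
          | none => simp [hsep] at hsome
          | some sp =>
            have := (hs sp hsep).1
            cases sp with
            | nil => simp_all
            | cons a as => simp
        rw [show c :: (rest ++ w2) = (c :: rest) ++ w2 by simp,
          List.drop_append_of_le_length hk]
        have htok : PySem.Chars.strip ((cur ++ w1.reverse).reverse) = PySem.Chars.strip cur.reverse := by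
          rw [show (cur ++ w1.reverse).reverse = w1 ++ cur.reverse by simp]
          exact pvStripWSLeft w1 _ hw1
        rw [htok]
        have := ih sep (b-1) sep2 b2 [] w2 ((c :: rest).drop (sep.getD []).length) []
          (PySem.Chars.strip cur.reverse :: acc) hs hs2 (by simp) hw2
          (by have := List.length_drop (l := (c :: rest)) (i := (sep.getD []).length); simp_all; omega)
        simpa using this
      · have hcond' := fun h => hcond (hcondEq.mp h)
        simp only [reduceCtorEq, if_false, if_neg hcond, if_neg hcond']
        have := ih sep b sep2 b2 w1 w2 rest (c :: cur) acc hs hs2 hw1 hw2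
          (by simp at hlen ⊢; omega)
        simpa using this

theorem pvGoZero (sep : List Char) (fuel : Nat) (l cur : List Char) (acc : List (List Char)) :
    PySem.Chars.splitOnMax.go sep fuel 0 l cur acc = ((cur.reverse ++ l) :: acc).reverse := by
  cases fuel with
  | zero => simp [PySem.Chars.splitOnMax.go]
  | succ f =>
    cases l with
    | nil => simp [PySem.Chars.splitOnMax.go]
    | cons c rest => simp [PySem.Chars.splitOnMax.go]

theorem pvScanNeg (sp : List Char) (fuel : Nat) :
    ∀ (b : Int) (sep2 : Option (List Char)) (b2 : Int) (l cur : List Char) (acc : List (List Char)),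
    b < 0 →
    pvScanGo fuel (some sp) b none sep2 b2 l cur (acc.map PySem.Chars.strip) =
      (PySem.Chars.splitOn.go sp fuel l cur acc).map PySem.Chars.strip := by
  induction fuel with
  | zero =>
    intro b sep2 b2 l cur acc hb
    simp [pvScanGo, PySem.Chars.splitOn.go]
  | succ f ih =>
    intro b sep2 b2 l cur acc hb
    cases l with
    | nil => simp [pvScanGo, PySem.Chars.splitOn.go]
    | cons c rest =>
      simp only [pvScanGo, PySem.Chars.splitOn.go]
      by_cases hpre : sp.isPrefixOf (c :: rest)
      · have hcond : b ≠ 0 ∧ (some sp).isSome ∧ ((some sp).getD []).isPrefixOf (c :: rest) := by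
          refine ⟨by omega, by simp, by simpa using hpre⟩
        simp only [reduceCtorEq, if_false, if_pos hcond, if_pos hpre]
        have := ih (b-1) sep2 b2 ((c :: rest).drop sp.length) [] (cur.reverse :: acc) (by omega)
        simpa using this
      · have hcond : ¬ (b ≠ 0 ∧ (some sp).isSome ∧ ((some sp).getD []).isPrefixOf (c :: rest)) := by
          simp [hpre]
        simp only [reduceCtorEq, if_false, if_neg hcond, if_neg hpre]
        exact ih b sep2 b2 rest (c :: cur) acc hb

theorem pvScanNat (sp : List Char) (hsp : sp ≠ []) (fuel : Nat) :
    ∀ (m : Nat) (sep2 : Option (List Char)) (b2 : Int) (l cur : List Char) (acc : List (List Char)),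
    l.length < fuel →
    pvScanGo fuel (some sp) (m : Int) none sep2 b2 l cur (acc.map PySem.Chars.strip) =
      (PySem.Chars.splitOnMax.go sp fuel m l cur acc).map PySem.Chars.strip := by
  induction fuel with
  | zero => intro _ _ _ l _ _ h; omega
  | succ f ih =>
    intro m sep2 b2 l cur acc hl
    cases l with
    | nil => simp [pvScanGo, PySem.Chars.splitOnMax.go]
    | cons c rest =>
      cases m with
      | zero =>
        rw [pvGoZero]
        simp only [Nat.cast_zero]
        rw [pvStop (f+1) (some sp) (0 : Int) sep2 b2 (c :: rest) cur
          (acc.map PySem.Chars.strip) (by simp) hl]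
        simp
      | succ m' =>
        simp only [pvScanGo, PySem.Chars.splitOnMax.go]
        by_cases hpre : sp.isPrefixOf (c :: rest)
        · have hcond : ((m'+1 : Nat) : Int) ≠ 0 ∧ (some sp).isSome ∧
              ((some sp).getD []).isPrefixOf (c :: rest) := by
            refine ⟨by exact_mod_cast (by omega : (m'+1 : Int) ≠ 0), by simp, by simpa using hpre⟩
          simp only [reduceCtorEq, if_false, if_pos hcond, if_pos hpre]
          have hcast : ((m' + 1 : Nat) : Int) - 1 = ((m' : Nat) : Int) := by push_cast; ring
          rw [hcast]
          have hk1 : 1 ≤ sp.length := by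
            cases sp with
            | nil => simp_all
            | cons a as => simp
          have := ih m' sep2 b2 ((c :: rest).drop sp.length) [] (cur.reverse :: acc)
            (by have := List.length_drop (l := (c :: rest)) (i := sp.length); simp_all; omega)
          simpa using this
        · have hcond : ¬ (((m'+1 : Nat) : Int) ≠ 0 ∧ (some sp).isSome ∧
              ((some sp).getD []).isPrefixOf (c :: rest)) := by
            simp [hpre]
          simp only [reduceCtorEq, if_false, if_neg hcond, if_neg hpre]
          exact ih (m'+1) sep2 b2 rest (c :: cur) acc (by simp at hl ⊢; omega)

theorem pvAtGo (rgt : List Char) : ∀ (lft : List Char), '@' ∉ lft →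
    ∀ (fuel : Nat) (cur : List Char) (acc : List (List Char)), lft.length < fuel →
    PySem.Chars.splitOnMax.go ['@'] fuel 1 (lft ++ '@' :: rgt) cur acc =
      acc.reverse ++ [cur.reverse ++ lft, rgt] := by
  intro lft
  induction lft with
  | nil =>
    intro _ fuel cur acc hf
    cases fuel with
    | zero => omega
    | succ f =>
      simp only [List.nil_append, PySem.Chars.splitOnMax.go]
      have hpre : List.isPrefixOf ['@'] ('@' :: rgt) = true := by simp [List.isPrefixOf]
      simp only [if_pos hpre, reduceCtorEq, if_false]
      rw [pvGoZero]
      simp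
  | cons c lt ih =>
    intro hmem fuel cur acc hf
    cases fuel with
    | zero => simp at hf
    | succ f =>
      have hc : c ≠ '@' := by intro h; exact hmem (by simp [h])
      simp only [List.cons_append, PySem.Chars.splitOnMax.go]
      have hpre : ¬ (List.isPrefixOf ['@'] (c :: (lt ++ '@' :: rgt)) = true) := by
        simp [List.isPrefixOf, beq_iff_eq]
        intro h
        exact hc h.symm
      simp only [if_neg hpre, reduceCtorEq, if_false]
      rw [ih (fun h => hmem (by simp [h])) f (c :: cur) acc (by simp at hf ⊢; omega)]
      simp

theorem pvAtSplit (lft rgt : List Char) (h : '@' ∉ lft) :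
    PySem.Chars.splitOnMax (lft ++ '@' :: rgt) ['@'] 1 = [lft, rgt] := by
  unfold PySem.Chars.splitOnMax
  rw [if_neg (by norm_num)]
  simp only [Int.toNat_one]
  rw [pvAtGo rgt lft h _ [] [] (by simp)]
  simp

theorem pvTrans (sep1 : Option (List Char)) (sep2 : Option (List Char)) (b2 : Int)
    (h1 : ∀ sp, sep1 = some sp → sp ≠ [] ∧ '@' ∉ sp) (h2 : pvSepOk sep2) :
    ∀ (fuel : Nat), ∀ (lft : List Char) (rgt : List Char) (b1 : Int) (cur : List Char)
      (acc : List (List Char)), '@' ∉ lft → lft.length + rgt.length + 1 < fuel →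
    pvScanGo fuel sep1 b1 (some '@') sep2 b2 (lft ++ '@' :: rgt) cur acc =
      pvScanGo fuel sep2 b2 none sep2 b2 rgt []
        ((pvScanGo fuel sep1 b1 none sep2 b2 lft cur acc).reverse) := by
  have hs1 : pvSepOk sep1 := fun sp h => (h1 sp h).1
  intro fuel
  induction fuel with
  | zero => intro lft rgt _ _ _ _ h; omega
  | succ f ih =>
    intro lft rgt b1 cur acc hmem hlen
    cases lft with
    | nil =>
      simp only [List.length_nil] at hlen
      simp only [List.nil_append, pvScanGo, if_true, List.reverse_reverse]
      exact pvFuelIrrel f (f+1) sep2 b2 none sep2 b2 rgt [] _ h2 h2 (by omega) (by omega)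
    | cons c lt =>
      simp only [List.length_cons] at hlen
      have hc : c ≠ '@' := fun h => hmem (by simp [h])
      simp only [List.cons_append, pvScanGo]
      have htr : ¬ (some '@' = some c) := by simp [Ne.symm hc]
      have htr' : ¬ ((none : Option Char) = some c) := by simp
      rw [if_neg htr, if_neg htr']
      have hpreEq : (sep1.getD []).isPrefixOf (c :: (lt ++ '@' :: rgt)) =
          (sep1.getD []).isPrefixOf (c :: lt) := by
        cases hsep : sep1 with
        | none => simp
        | some sp =>
          obtain ⟨-, hat⟩ := h1 sp hsep
          simpa using pvPrefixAppend sp '@' hat (c :: lt) rgt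
      by_cases hcond : b1 ≠ 0 ∧ sep1.isSome ∧ (sep1.getD []).isPrefixOf (c :: lt)
      · have hcondL : b1 ≠ 0 ∧ sep1.isSome ∧ (sep1.getD []).isPrefixOf (c :: (lt ++ '@' :: rgt)) :=
          ⟨hcond.1, hcond.2.1, by rw [hpreEq]; exact hcond.2.2⟩
        rw [if_pos hcondL, if_pos hcond]
        obtain ⟨hb1, hsome, hpre⟩ := hcond
        have hk : (sep1.getD []).length ≤ (c :: lt).length :=
          (List.isPrefixOf_iff_prefix.mp hpre).length_le
        have hk1 : 1 ≤ (sep1.getD []).length := by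
          cases hsep : sep1 with
          | none => simp [hsep] at hsome
          | some sp =>
            have := (h1 sp hsep).1
            cases sp with
            | nil => simp_all
            | cons a as => simp
        have hdlen := List.length_drop (l := (c :: lt)) (i := (sep1.getD []).length)
        simp only [List.length_cons] at hk hdlen
        rw [show c :: (lt ++ '@' :: rgt) = (c :: lt) ++ '@' :: rgt by simp,
          List.drop_append_of_le_length (by simpa using hk)]
        have hmem' : '@' ∉ (c :: lt).drop (sep1.getD []).length :=
          fun h => hmem (List.mem_of_mem_drop h)
        rw [ih ((c :: lt).drop (sep1.getD []).length) rgt (b1-1) []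
          (PySem.Chars.strip cur.reverse :: acc) hmem' (by simp; omega)]
        exact pvFuelIrrel f (f+1) sep2 b2 none sep2 b2 rgt [] _ h2 h2 (by omega) (by omega)
      · have hcondL : ¬ (b1 ≠ 0 ∧ sep1.isSome ∧ (sep1.getD []).isPrefixOf (c :: (lt ++ '@' :: rgt))) := by
          rw [hpreEq]; exact hcond
        rw [if_neg hcondL, if_neg hcond]
        rw [ih lt rgt b1 (c :: cur) acc (fun h => hmem (by simp [h])) (by omega)]
        exact pvFuelIrrel f (f+1) sep2 b2 none sep2 b2 rgt [] _ h2 h2 (by omega) (by omega)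

theorem pvStripDecomp (h : List Char) : ∃ w1 w2 : List Char,
    (∀ c ∈ w1, PySem.Chars.isspace c = true) ∧ (∀ c ∈ w2, PySem.Chars.isspace c = true) ∧
    h = w1 ++ PySem.Chars.strip h ++ w2 := by
  refine ⟨h.takeWhile PySem.Chars.isspace,
    ((PySem.Chars.lstrip h).reverse.takeWhile PySem.Chars.isspace).reverse,
    fun c hc => List.mem_takeWhile_imp hc,
    fun c hc => List.mem_takeWhile_imp (List.mem_reverse.mp hc), ?_⟩
  conv_lhs => rw [← List.takeWhile_append_dropWhile (p := PySem.Chars.isspace) (l := h)]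
  rw [List.append_assoc]
  congr 1
  have : (PySem.Chars.lstrip h) = List.dropWhile PySem.Chars.isspace h := rfl
  rw [← this]
  conv_lhs => rw [← List.reverse_reverse (PySem.Chars.lstrip h),
    ← List.takeWhile_append_dropWhile (p := PySem.Chars.isspace) (l := (PySem.Chars.lstrip h).reverse)]
  rw [List.reverse_append]
  congr 1

-- "(sep, budget) is one of B's half-specs, and on any half it scans to f (strip half)"
def pvHalfOK (sep : Option (List Char)) (b : Int) (f : List Char → List (List Char)) : Prop :=
  (∀ sp, sep = some sp → sp ≠ [] ∧ '@' ∉ sp ∧ ∀ c ∈ sp, PySem.Chars.isspace c = false) ∧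
  ∀ (F : Nat) (s2 : Option (List Char)) (b2 : Int) (h : List Char), pvSepOk s2 → h.length < F →
    pvScanGo F sep b none s2 b2 h [] [] = f (PySem.Chars.strip h)

set_option maxRecDepth 4096 in
theorem pvHalfNone : pvHalfOK none 0 (fun u => [u]) := by
  refine ⟨fun sp h => by simp at h, ?_⟩
  intro F s2 b2 h hs2 hF
  rw [pvStop F none 0 s2 b2 h [] [] (Or.inl rfl) hF]
  simp

theorem pvHalfScanStrip (sp : List Char) (hsp : sp ≠ [])
    (hnw : ∀ c ∈ sp, PySem.Chars.isspace c = false) (b : Int)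
    (F : Nat) (s2 : Option (List Char)) (b2 : Int) (h : List Char)
    (hs2 : pvSepOk s2) (hF : h.length < F) :
    pvScanGo F (some sp) b none s2 b2 h [] [] =
      pvScanGo F (some sp) b none s2 b2 (PySem.Chars.strip h) [] [] := by
  have hsNoWS : pvSepNoWS (some sp) := by
    intro sp' he
    cases he
    exact ⟨hsp, hnw⟩
  obtain ⟨w1, w2, hw1, hw2, hdec⟩ := pvStripDecomp h
  have hlen : w1.length + ((PySem.Chars.strip h ++ w2).length) < F := by
    have := congrArg List.length hdec
    simp at this ⊢
    omega
  conv_lhs => rw [hdec, List.append_assoc]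
  rw [pvConsumeWS F (some sp) b s2 b2 w1 _ [] [] hsNoWS hs2 hw1 hlen]
  rw [show w1.reverse ++ ([] : List Char) = [] ++ w1.reverse by simp]
  rw [pvStripCommute F (some sp) b s2 b2 w1 w2 (PySem.Chars.strip h) [] [] hsNoWS hs2 hw1 hw2
    (by simp at hlen ⊢; omega)]

set_option maxRecDepth 4096 in
theorem pvHalfTo : pvHalfOK (some ['t','o']) 1
    (fun u => (PySem.Chars.splitOnMax u ['t','o'] 1).map PySem.Chars.strip) := by
  refine ⟨fun sp h => by cases h; exact ⟨by simp, by decide, by intro c hc; fin_cases hc <;> rfl⟩, ?_⟩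
  intro F s2 b2 h hs2 hF
  show pvScanGo F (some ['t','o']) 1 none s2 b2 h [] [] =
    (PySem.Chars.splitOnMax (PySem.Chars.strip h) ['t','o'] 1).map PySem.Chars.strip
  rw [pvHalfScanStrip ['t','o'] (by simp) (by intro c hc; fin_cases hc <;> rfl) 1 F s2 b2 h hs2 hF]
  set u := PySem.Chars.strip h with hu
  have hulen : u.length ≤ h.length := by
    obtain ⟨w1, w2, _, _, hdec⟩ := pvStripDecomp h
    have := congrArg List.length hdec
    simp [← hu] at this
    omega
  unfold PySem.Chars.splitOnMax
  rw [if_neg (by norm_num), Int.toNat_one]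
  rw [← pvScanNat ['t','o'] (by simp) (u.length+1) 1 s2 b2 u [] [] (by omega)]
  rw [show ((1:Nat):Int) = (1:Int) by simp]
  exact pvFuelIrrel F (u.length+1) (some ['t','o']) 1 none s2 b2 u [] []
    (by intro sp' he; cases he; simp) hs2 (by omega) (by omega)

set_option maxRecDepth 4096 in
theorem pvHalfComma : pvHalfOK (some [',']) (-1)
    (fun u => (PySem.Chars.splitOn u [',']).map PySem.Chars.strip) := by
  refine ⟨fun sp h => by cases h; exact ⟨by simp, by decide, by intro c hc; fin_cases hc; rfl⟩, ?_⟩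
  intro F s2 b2 h hs2 hF
  show pvScanGo F (some [',']) (-1) none s2 b2 h [] [] =
    (PySem.Chars.splitOn (PySem.Chars.strip h) [',']).map PySem.Chars.strip
  rw [pvHalfScanStrip [','] (by simp) (by intro c hc; fin_cases hc; rfl) (-1) F s2 b2 h hs2 hF]
  set u := PySem.Chars.strip h with hu
  have hulen : u.length ≤ h.length := by
    obtain ⟨w1, w2, _, _, hdec⟩ := pvStripDecomp h
    have := congrArg List.length hdec
    simp [← hu] at this
    omega
  unfold PySem.Chars.splitOn
  rw [← pvScanNeg [','] (u.length+1) (-1) s2 b2 u [] [] (by norm_num)]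
  exact pvFuelIrrel F (u.length+1) (some [',']) (-1) none s2 b2 u [] []
    (by intro sp' he; cases he; simp) hs2 (by omega) (by omega)

theorem pvMain (s1 : Option (List Char)) (b1 : Int) (s2 : Option (List Char)) (b2 : Int)
    (f1 f2 : List Char → List (List Char)) (h1 : pvHalfOK s1 b1 f1) (h2 : pvHalfOK s2 b2 f2)
    (lft rgt : List Char) (hmem : '@' ∉ lft) :
    pvScan (lft ++ '@' :: rgt) s1 b1 (some '@') s2 b2 =
      f1 (PySem.Chars.strip lft) ++ f2 (PySem.Chars.strip rgt) := by
  obtain ⟨hsp1, hscan1⟩ := h1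
  obtain ⟨hsp2, hscan2⟩ := h2
  have hok1 : pvSepOk s1 := fun sp h => (hsp1 sp h).1
  have hok2 : pvSepOk s2 := fun sp h => (hsp2 sp h).1
  unfold pvScan
  set F := (lft ++ '@' :: rgt).length + 1 with hF
  have hFlen : lft.length + rgt.length + 1 < F := by rw [hF]; simp
  rw [pvTrans s1 s2 b2 (fun sp h => ⟨(hsp1 sp h).1, (hsp1 sp h).2.1⟩) hok2 F lft rgt b1 [] []
    hmem hFlen]
  rw [hscan1 F s2 b2 lft hok2 (by omega)]
  rw [pvAccOut F s2 b2 none s2 b2 rgt []]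
  rw [hscan2 F s2 b2 rgt hok2 (by omega)]
  simp

theorem pvAtDecomp (mk : String) (hin : PySem.Str.isIn "@" mk = true) :
    ∃ lft rgt : List Char, mk.toList = lft ++ '@' :: rgt ∧ '@' ∉ lft := by
  have h1 : ('@' : Char) ∈ mk.toList := by
    rw [PySem.Str.isIn_eq] at hin
    obtain ⟨s, t, he⟩ := (PySem.Chars.isIn_iff_infix _ _).mp hin
    rw [show ("@" : String).toList = ['@'] from rfl] at he
    rw [← he]; simp
  obtain ⟨s, t, he, hmem⟩ := List.eq_append_cons_of_mem h1
  exact ⟨s, t, he, hmem⟩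

theorem pvAtSplitStr (mk : String) (lft rgt : List Char) (hdec : mk.toList = lft ++ '@' :: rgt)
    (hmem : '@' ∉ lft) :
    PySem.Str.splitMax? mk "@" 1 = some [String.ofList lft, String.ofList rgt] := by
  unfold PySem.Str.splitMax? PySem.Chars.splitMax?
  rw [show ("@" : String).toList = ['@'] from rfl, hdec]
  rw [if_neg (by simp)]
  rw [pvAtSplit lft rgt hmem]
  rfl

theorem pvStripOfList (x : List Char) :
    PySem.Str.strip (String.ofList x) = String.ofList (PySem.Chars.strip x) := by
  simp [PySem.Str.strip, String.toList_ofList]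

theorem pvScanWhole (sp : List Char) (s : List Char) :
    pvScan s (some sp) (-1) none none 0 = (PySem.Chars.splitOn s sp).map PySem.Chars.strip := by
  unfold pvScan PySem.Chars.splitOn
  exact pvScanNeg sp (s.length + 1) (-1) none 0 s [] [] (by norm_num)

theorem pvStrSplitMaxTo (x : List Char) :
    PySem.Str.splitMax? (String.ofList x) "to" 1 =
      some ((PySem.Chars.splitOnMax x ['t','o'] 1).map String.ofList) := by
  unfold PySem.Str.splitMax? PySem.Chars.splitMax?
  simp only [String.toList_ofList]
  rw [show ("to" : String).toList = ['t','o'] from rfl, if_neg (by simp)]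
  rfl

theorem pvStrSplitComma (x : List Char) :
    PySem.Str.split? (String.ofList x) "," =
      some ((PySem.Chars.splitOn x [',']).map String.ofList) := by
  unfold PySem.Str.split? PySem.Chars.split?
  simp only [String.toList_ofList]
  rw [show ("," : String).toList = [','] from rfl, if_neg (by simp)]
  rfl

theorem pvStripOfListComp :
    (PySem.Str.strip ∘ String.ofList) = (String.ofList ∘ PySem.Chars.strip) :=
  funext fun x => pvStripOfList x

theorem pvStrSplitWholeTo (mk : String) :
    PySem.Str.split? mk "to" = some ((PySem.Chars.splitOn mk.toList ['t','o']).map String.ofList) := by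
  unfold PySem.Str.split? PySem.Chars.split?
  rw [show ("to" : String).toList = ['t','o'] from rfl, if_neg (by simp)]
  rfl

theorem pvStrSplitWholeComma (mk : String) :
    PySem.Str.split? mk "," = some ((PySem.Chars.splitOn mk.toList [',']).map String.ofList) := by
  unfold PySem.Str.split? PySem.Chars.split?
  rw [show ("," : String).toList = [','] from rfl, if_neg (by simp)]
  rfl

-- ===== VERDICT (by name: the statement is the Claim_ definition above) =====
theorem extract_block_texts_spec : Claim_equal_extract_block_texts := by
  intro main_key category _
  unfold Spec_extract_block_texts
  by_cases h1 : category = "Single Value with Single Condition"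
  · by_cases hin : PySem.Str.isIn "@" (PySem.Str.strip main_key) = true
    · obtain ⟨lft, rgt, hdec, hmem⟩ := pvAtDecomp _ hin
      have e := pvAtSplitStr _ lft rgt hdec hmem
      have hm := pvMain _ _ _ _ _ _ pvHalfNone pvHalfNone lft rgt hmem
      simp only [PySem.Str.isIn_eq, PySem.Str.toList_strip,
        show ("@" : String).toList = ['@'] from rfl] at hin
      simp only [PySem.Str.toList_strip] at hdec
      simp [extract_block_texts, extract_block_texts_alt, pvSpecs, PySem.Dict.get?_mk_cons,
        h1, e, hdec, hm, pvStripOfList]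
    · simp only [PySem.Str.isIn_eq, PySem.Str.toList_strip,
        show ("@" : String).toList = ['@'] from rfl] at hin
      simp [extract_block_texts, extract_block_texts_alt, pvSpecs, PySem.Dict.get?_mk_cons, h1, hin]
  by_cases h2 : category = "Number with Single Condition"
  · by_cases hin : PySem.Str.isIn "@" (PySem.Str.strip main_key) = true
    · obtain ⟨lft, rgt, hdec, hmem⟩ := pvAtDecomp _ hin
      have e := pvAtSplitStr _ lft rgt hdec hmem
      have hm := pvMain _ _ _ _ _ _ pvHalfNone pvHalfNone lft rgt hmem
      simp only [PySem.Str.isIn_eq, PySem.Str.toList_strip,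
        show ("@" : String).toList = ['@'] from rfl] at hin
      simp only [PySem.Str.toList_strip] at hdec
      simp [extract_block_texts, extract_block_texts_alt, pvSpecs, PySem.Dict.get?_mk_cons,
        h2, e, hdec, hm, pvStripOfList]
    · simp only [PySem.Str.isIn_eq, PySem.Str.toList_strip,
        show ("@" : String).toList = ['@'] from rfl] at hin
      simp [extract_block_texts, extract_block_texts_alt, pvSpecs, PySem.Dict.get?_mk_cons, h2, hin]
  by_cases h3 : category = "Single Value with Range Condition"
  · by_cases hin : PySem.Str.isIn "@" (PySem.Str.strip main_key) = true
    · obtain ⟨lft, rgt, hdec, hmem⟩ := pvAtDecomp _ hin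
      have e := pvAtSplitStr _ lft rgt hdec hmem
      have hm := pvMain _ _ _ _ _ _ pvHalfNone pvHalfTo lft rgt hmem
      simp only [PySem.Str.isIn_eq, PySem.Str.toList_strip,
        show ("@" : String).toList = ['@'] from rfl] at hin
      simp only [PySem.Str.toList_strip] at hdec
      simp [extract_block_texts, extract_block_texts_alt, pvSpecs, PySem.Dict.get?_mk_cons,
        h3, e, hdec, hm, pvStripOfList, pvStrSplitMaxTo, pvStripOfListComp]
    · simp only [PySem.Str.isIn_eq, PySem.Str.toList_strip,
        show ("@" : String).toList = ['@'] from rfl] at hin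
      simp [extract_block_texts, extract_block_texts_alt, pvSpecs, PySem.Dict.get?_mk_cons, h3, hin]
  by_cases h4 : category = "Range Value Single Condition"
  · by_cases hin : PySem.Str.isIn "@" (PySem.Str.strip main_key) = true
    · obtain ⟨lft, rgt, hdec, hmem⟩ := pvAtDecomp _ hin
      have e := pvAtSplitStr _ lft rgt hdec hmem
      have hm := pvMain _ _ _ _ _ _ pvHalfTo pvHalfNone lft rgt hmem
      simp only [PySem.Str.isIn_eq, PySem.Str.toList_strip,
        show ("@" : String).toList = ['@'] from rfl] at hin
      simp only [PySem.Str.toList_strip] at hdec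
      simp [extract_block_texts, extract_block_texts_alt, pvSpecs, PySem.Dict.get?_mk_cons,
        h4, e, hdec, hm, pvStripOfList, pvStrSplitMaxTo, pvStripOfListComp]
    · simp only [PySem.Str.isIn_eq, PySem.Str.toList_strip,
        show ("@" : String).toList = ['@'] from rfl] at hin
      simp [extract_block_texts, extract_block_texts_alt, pvSpecs, PySem.Dict.get?_mk_cons, h4, hin]
  by_cases h5 : category = "Range Value with Range Condition"
  · by_cases hin : PySem.Str.isIn "@" (PySem.Str.strip main_key) = true
    · obtain ⟨lft, rgt, hdec, hmem⟩ := pvAtDecomp _ hin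
      have e := pvAtSplitStr _ lft rgt hdec hmem
      have hm := pvMain _ _ _ _ _ _ pvHalfTo pvHalfTo lft rgt hmem
      simp only [PySem.Str.isIn_eq, PySem.Str.toList_strip,
        show ("@" : String).toList = ['@'] from rfl] at hin
      simp only [PySem.Str.toList_strip] at hdec
      simp [extract_block_texts, extract_block_texts_alt, pvSpecs, PySem.Dict.get?_mk_cons,
        h5, e, hdec, hm, pvStripOfList, pvStrSplitMaxTo, pvStripOfListComp]
    · simp only [PySem.Str.isIn_eq, PySem.Str.toList_strip,
        show ("@" : String).toList = ['@'] from rfl] at hin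
      simp [extract_block_texts, extract_block_texts_alt, pvSpecs, PySem.Dict.get?_mk_cons, h5, hin]
  by_cases h6 : category = "Range Values"
  · simp [extract_block_texts, extract_block_texts_alt,
      h6, pvStrSplitWholeTo, pvScanWhole, pvStripOfListComp]
  by_cases h7 : category = "Single Value Multi Condition"
  · by_cases hin : PySem.Str.isIn "@" (PySem.Str.strip main_key) = true
    · obtain ⟨lft, rgt, hdec, hmem⟩ := pvAtDecomp _ hin
      have e := pvAtSplitStr _ lft rgt hdec hmem
      have hm := pvMain _ _ _ _ _ _ pvHalfNone pvHalfComma lft rgt hmem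
      simp only [PySem.Str.isIn_eq, PySem.Str.toList_strip,
        show ("@" : String).toList = ['@'] from rfl] at hin
      simp only [PySem.Str.toList_strip] at hdec
      simp [extract_block_texts, extract_block_texts_alt, pvSpecs, PySem.Dict.get?_mk_cons,
        h7, e, hdec, hm, pvStripOfList, pvStrSplitComma, pvStripOfListComp]
    · simp only [PySem.Str.isIn_eq, PySem.Str.toList_strip,
        show ("@" : String).toList = ['@'] from rfl] at hin
      simp [extract_block_texts, extract_block_texts_alt, pvSpecs, PySem.Dict.get?_mk_cons, h7, hin]
  by_cases h8 : category = "Multi Value with Single Condition"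
  · by_cases hin : PySem.Str.isIn "@" (PySem.Str.strip main_key) = true
    · obtain ⟨lft, rgt, hdec, hmem⟩ := pvAtDecomp _ hin
      have e := pvAtSplitStr _ lft rgt hdec hmem
      have hm := pvMain _ _ _ _ _ _ pvHalfComma pvHalfNone lft rgt hmem
      simp only [PySem.Str.isIn_eq, PySem.Str.toList_strip,
        show ("@" : String).toList = ['@'] from rfl] at hin
      simp only [PySem.Str.toList_strip] at hdec
      simp [extract_block_texts, extract_block_texts_alt, pvSpecs, PySem.Dict.get?_mk_cons,
        h8, e, hdec, hm, pvStripOfList, pvStrSplitComma, pvStripOfListComp]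
    · simp only [PySem.Str.isIn_eq, PySem.Str.toList_strip,
        show ("@" : String).toList = ['@'] from rfl] at hin
      simp [extract_block_texts, extract_block_texts_alt, pvSpecs, PySem.Dict.get?_mk_cons, h8, hin]
  by_cases h9 : category = "Range Value with Multi Condition"
  · by_cases hin : PySem.Str.isIn "@" (PySem.Str.strip main_key) = true
    · obtain ⟨lft, rgt, hdec, hmem⟩ := pvAtDecomp _ hin
      have e := pvAtSplitStr _ lft rgt hdec hmem
      have hm := pvMain _ _ _ _ _ _ pvHalfTo pvHalfComma lft rgt hmem
      simp only [PySem.Str.isIn_eq, PySem.Str.toList_strip,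
        show ("@" : String).toList = ['@'] from rfl] at hin
      simp only [PySem.Str.toList_strip] at hdec
      simp [extract_block_texts, extract_block_texts_alt, pvSpecs, PySem.Dict.get?_mk_cons,
        h9, e, hdec, hm, pvStripOfList, pvStrSplitMaxTo, pvStripOfListComp, pvStrSplitComma]
    · simp only [PySem.Str.isIn_eq, PySem.Str.toList_strip,
        show ("@" : String).toList = ['@'] from rfl] at hin
      simp [extract_block_texts, extract_block_texts_alt, pvSpecs, PySem.Dict.get?_mk_cons, h9, hin]
  by_cases h10 : category = "Multi Values"
  · simp [extract_block_texts, extract_block_texts_alt,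
      h10, pvStrSplitWholeComma, pvScanWhole, pvStripOfListComp]
  · simp [extract_block_texts, extract_block_texts_alt, pvSpecs, PySem.Dict.get?,
      h1, h2, h3, h4, h5, h6, h7, h8, h9, h10,
      Ne.symm h1, Ne.symm h2, Ne.symm h3, Ne.symm h4, Ne.symm h5,
      Ne.symm h7, Ne.symm h8, Ne.symm h9]
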